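-- pv_equiv track=rewrite | github.com/emil817/Pleiades-visualizer | pleiades_visualize.py | normalize_table_data
-- ===== SOURCE A (Python) =====
-- def normalize_table_data(rows):
--     normalized = []
--     for row in rows:
--         normalized.append(
--             [str(cell).strip() if cell is not None else "" for cell in row]
--         )
--
--     while normalized and not any(normalized[-1]):
--         normalized.pop()
--
--     if not normalized:
--         return []
--
--     max_cols = max(len(row) for row in normalized)
--     while max_cols > 0 and all(
--         len(row) <= max_cols - 1 or not row[max_cols - 1] for row in normalized
--     ):
--         max_cols -= 1
--
--     if max_cols <= 0:
--         return []
--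
--     return [row[:max_cols] + [""] * (max_cols - len(row)) for row in normalized]
-- ===== SOURCE B (Python) =====
-- def _last_nonempty(row):
--     last = 0
--     j = 0
--     for cell in row:
--         j += 1
--         if cell:
--             last = j
--     return last
--
--
-- def normalize_table_data(rows):
--     stripped = [[cell.strip() if cell is not None else "" for cell in row] for row in rows]
--     i = height = width = 0
--     for row in stripped:
--         i += 1
--         last = _last_nonempty(row)
--         if last:
--             height = i
--             if last > width:
--                 width = last
--     if width == 0:
--         return []
--     return [row[:width] + [""] * (width - len(row)) for row in stripped[:height]]
-- ===== Notes on version B (the rewrite author's own statement) =====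
-- stated objective: simpler
-- what changed: Replaces the pop-while loop and the repeated rightmost-column rescan (decrementing max_cols while the whole top column is empty) by one forward pass that records, per row, the 1-based index of its last non-empty cell, keeping the running table height and width; the output is then a single slice-and-pad over the kept prefix.
import Mathlib
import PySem

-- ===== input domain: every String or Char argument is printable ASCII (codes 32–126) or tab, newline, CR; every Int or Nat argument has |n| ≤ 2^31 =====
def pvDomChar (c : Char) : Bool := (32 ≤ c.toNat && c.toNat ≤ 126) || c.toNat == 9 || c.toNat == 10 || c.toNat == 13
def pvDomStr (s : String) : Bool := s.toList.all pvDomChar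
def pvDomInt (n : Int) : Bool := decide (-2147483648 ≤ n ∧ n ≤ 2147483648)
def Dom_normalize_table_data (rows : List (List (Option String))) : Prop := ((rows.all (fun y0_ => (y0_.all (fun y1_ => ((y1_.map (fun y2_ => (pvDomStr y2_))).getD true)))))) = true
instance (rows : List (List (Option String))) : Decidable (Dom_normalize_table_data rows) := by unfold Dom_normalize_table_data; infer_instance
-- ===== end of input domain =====

-- B replaces A's trailing pop-loop and repeated rightmost-column rescans by one forward pass
-- computing per-row last-nonempty indices (simpler decomposition; same results).

-- ===== PORT A =====
-- str(cell).strip() if cell is not None else ""  (cells are strings on Dom, so str() is identity)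
def aStripCell (cell : Option String) : String :=
  match cell with
  | some s => PySem.Str.strip s
  | none => ""

-- while normalized and not any(normalized[-1]): normalized.pop()
def aPopTrailing (xs : List (List String)) : List (List String) :=
  match h : xs.getLast? with
  | none => xs
  | some last => if last.any (fun s => s != "") then xs else aPopTrailing xs.dropLast
termination_by xs.length
decreasing_by
  have hne : xs ≠ [] := by intro hnil; rw [hnil] at h; simp at h
  have hp : 0 < xs.length := List.length_pos_iff.mpr hne
  simp only [List.length_dropLast]
  omega

-- while max_cols > 0 and all(len(row) <= max_cols - 1 or not row[max_cols - 1] for row in normalized): max_cols -= 1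
def aShrink (t : List (List String)) : Nat → Nat
  | 0 => 0
  | (k+1) =>
      if t.all (fun row => decide (row.length ≤ k) || (row.getD k "" == ""))
      then aShrink t k
      else k + 1

def normalize_table_data (rows : List (List (Option String))) : List (List String) :=
  let normalized := rows.foldl (fun acc row => acc ++ [row.map aStripCell]) []
  let t := aPopTrailing normalized
  if t = [] then []
  else
    let maxCols0 := (PySem.List.max? (t.map (fun row => row.length)) (fun x => x)).getD 0
    let m := aShrink t maxCols0
    if m = 0 then []
    else t.map (fun row => row.take m ++ List.replicate (m - row.length) "")

-- ===== PORT B =====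
def bStripCell (cell : Option String) : String :=
  match cell with
  | some s => PySem.Str.strip s
  | none => ""

-- _last_nonempty: 1-based index of the last truthy cell (0 if none), one forward pass
def bLastNonempty (row : List String) : Nat :=
  (row.foldl (fun (st : Nat × Nat) cell =>
      (st.1 + 1, if cell != "" then st.1 + 1 else st.2)) (0, 0)).2

def normalize_table_data_alt (rows : List (List (Option String))) : List (List String) :=
  let stripped := rows.map (fun row => row.map bStripCell)
  let st := stripped.foldl (fun (st : Nat × Nat × Nat) row =>
      let i := st.1 + 1
      let last := bLastNonempty row
      (i, if last ≠ 0 then i else st.2.1, if last > st.2.2 then last else st.2.2)) (0, 0, 0)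
  let height := st.2.1
  let width := st.2.2
  if width = 0 then []
  else (stripped.take height).map (fun row => row.take width ++ List.replicate (width - row.length) "")

-- ===== PRECONDITION & SPEC =====
def Spec_normalize_table_data (rows : List (List (Option String))) (out : List (List String)) : Prop := out = normalize_table_data_alt rows
instance (rows : List (List (Option String))) (out : List (List String)) : Decidable (Spec_normalize_table_data rows out) := by unfold Spec_normalize_table_data; infer_instance

-- ===== CLAIM (what is proved, stated in full; the proofs are below) =====
def Claim_equal_normalize_table_data : Prop := ∀ (rows : List (List (Option String))), Dom_normalize_table_data rows → Spec_normalize_table_data rows (normalize_table_data rows)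

-- ===== LEMMAS AND PROOFS =====

-- proof-only abbreviations
def pvQ (r : List String) : Bool := r.any (fun s => s != "")

def pvStep : Nat × Nat → String → Nat × Nat :=
  fun st cell => (st.1 + 1, if cell != "" then st.1 + 1 else st.2)

def pvRtrim (ns : List (List String)) : List (List String) :=
  (ns.reverse.dropWhile (fun r => !pvQ r)).reverse

def pvW (ns : List (List String)) : Nat :=
  ns.foldl (fun acc r => max acc (bLastNonempty r)) 0

lemma ext_eq (row : List String) : bLastNonempty row = (row.foldl pvStep (0, 0)).2 := rfl

lemma pvfold (xs : List String) : ∀ j l : Nat,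
    xs.foldl pvStep (j, l) = (j + xs.length, if bLastNonempty xs = 0 then l else j + bLastNonempty xs) := by
  induction xs with
  | nil => intro j l; simp [bLastNonempty]
  | cons c cs ih =>
    intro j l
    have hE : bLastNonempty (c :: cs)
        = if bLastNonempty cs = 0 then (if c != "" then 1 else 0) else 1 + bLastNonempty cs := by
      rw [ext_eq]
      show (List.foldl pvStep (pvStep (0, 0) c) cs).2 = _
      simp only [pvStep]
      rw [ih]
    show List.foldl pvStep (pvStep (j, l) c) cs = _
    simp only [pvStep]
    rw [ih, hE]
    by_cases hcs : bLastNonempty cs = 0 <;> by_cases hc : (c != "") = true <;>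
      simp [hcs, hc, Prod.ext_iff] <;> omega

lemma ext_concat (xs : List String) (c : String) :
    bLastNonempty (xs ++ [c]) = if c != "" then xs.length + 1 else bLastNonempty xs := by
  rw [ext_eq, List.foldl_append]
  rw [pvfold xs 0 0]
  show (pvStep _ c).2 = _
  simp only [pvStep]
  by_cases hxs : bLastNonempty xs = 0 <;> by_cases hc : (c != "") = true <;>
    simp [hxs, hc]

lemma ext_pos_iff (xs : List String) : bLastNonempty xs ≠ 0 ↔ pvQ xs = true := by
  induction xs using List.reverseRecOn with
  | nil => simp [bLastNonempty, pvQ]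
  | append_singleton xs c ih =>
    rw [ext_concat]
    simp only [pvQ, List.any_append, List.any_cons, List.any_nil] at *
    cases hc : (c != "")
    · simpa [hc] using ih
    · simp

lemma ext_le_length (xs : List String) : bLastNonempty xs ≤ xs.length := by
  induction xs using List.reverseRecOn with
  | nil => simp [bLastNonempty]
  | append_singleton xs c ih =>
    rw [ext_concat]
    split_ifs <;> simp
    omega

lemma ext_ge_empty (xs : List String) : ∀ j : Nat, bLastNonempty xs ≤ j → ∀ hj : j < xs.length, xs[j] = "" := by
  induction xs using List.reverseRecOn with
  | nil => intro j _ hj; simp at hj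
  | append_singleton xs c ih =>
    intro j hle hj
    rw [ext_concat] at hle
    by_cases hc : (c != "") = true
    · rw [if_pos hc] at hle
      simp at hj
      omega
    · rw [if_neg hc] at hle
      by_cases hlt : j < xs.length
      · rw [List.getElem_append_left hlt]
        exact ih j hle hlt
      · have hj2 : j < xs.length + 1 := by simpa using hj
        have hj' : j = xs.length := by omega
        subst hj'
        rw [List.getElem_concat_length]
        · simpa using hc
        · rfl

lemma ext_last_get (xs : List String) (h : bLastNonempty xs ≠ 0) :
    ∃ hlt : bLastNonempty xs - 1 < xs.length, xs[bLastNonempty xs - 1] ≠ "" := by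
  induction xs using List.reverseRecOn with
  | nil => simp [bLastNonempty] at h
  | append_singleton xs c ih =>
    rw [ext_concat] at h ⊢
    by_cases hc : (c != "") = true
    · rw [if_pos hc]
      refine ⟨by simp, ?_⟩
      have hi : xs.length + 1 - 1 = xs.length := by omega
      simp only [hi]
      rw [List.getElem_concat_length]
      · simpa using hc
      · rfl
    · rw [if_neg hc] at h ⊢
      obtain ⟨hlt, hne⟩ := ih h
      refine ⟨by simp; omega, ?_⟩
      rw [List.getElem_append_left hlt]
      exact hne

lemma aPop_concat (xs : List (List String)) (x : List String) :
    aPopTrailing (xs ++ [x]) = if pvQ x then xs ++ [x] else aPopTrailing xs := by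
  rw [aPopTrailing]
  split
  · rename_i heq
    rw [List.getLast?_concat] at heq
    cases heq
  · rename_i last heq
    rw [List.getLast?_concat] at heq
    cases heq
    rw [List.dropLast_concat]
    rfl

lemma rtrim_concat (xs : List (List String)) (x : List String) :
    pvRtrim (xs ++ [x]) = if pvQ x then xs ++ [x] else pvRtrim xs := by
  unfold pvRtrim
  rw [List.reverse_append]
  simp only [List.reverse_singleton, List.singleton_append, List.dropWhile_cons]
  cases hq : pvQ x <;> simp

lemma aPop_eq_rtrim (ns : List (List String)) : aPopTrailing ns = pvRtrim ns := by
  induction ns using List.reverseRecOn with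
  | nil => rw [aPopTrailing]; rfl
  | append_singleton xs x ih =>
    rw [aPop_concat, rtrim_concat, ih]

lemma rtrim_decomp (ns : List (List String)) :
    ∃ s, ns = pvRtrim ns ++ s ∧ ∀ r ∈ s, pvQ r = false := by
  induction ns using List.reverseRecOn with
  | nil => exact ⟨[], rfl, by simp⟩
  | append_singleton xs x ih =>
    rw [rtrim_concat]
    cases hq : pvQ x
    · simp only [Bool.false_eq_true, if_false]
      obtain ⟨s, hs, hall⟩ := ih
      refine ⟨s ++ [x], ?_, ?_⟩
      · conv_lhs => rw [hs]
        rw [List.append_assoc]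
      · intro r hr
        rcases List.mem_append.mp hr with h | h
        · exact hall r h
        · simp at h
          subst h
          exact hq
    · exact ⟨[], by simp, by simp⟩

lemma rtrim_prefix (ns : List (List String)) : ns.take (pvRtrim ns).length = pvRtrim ns := by
  obtain ⟨s, hs, -⟩ := rtrim_decomp ns
  calc ns.take (pvRtrim ns).length
      = (pvRtrim ns ++ s).take (pvRtrim ns).length := by rw [← hs]
    _ = pvRtrim ns := by simp

lemma rtrim_last (ns : List (List String)) (h : pvRtrim ns ≠ []) :
    ∃ r ∈ pvRtrim ns, pvQ r = true := by
  induction ns using List.reverseRecOn with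
  | nil => exact absurd rfl h
  | append_singleton xs x ih =>
    rw [rtrim_concat] at h ⊢
    cases hq : pvQ x
    · rw [hq] at h
      simp only [Bool.false_eq_true, if_false] at h ⊢
      exact ih h
    · simp only [if_true]
      exact ⟨x, by simp, hq⟩

lemma W_le (ns : List (List String)) : ∀ r ∈ ns, bLastNonempty r ≤ pvW ns := by
  intro r hr
  unfold pvW
  exact (PySem.List.le_foldl_max_nat ns bLastNonempty 0).2 r hr

lemma foldl_max_mem_gen (ns : List (List String)) :
    ∀ init : Nat, ns.foldl (fun acc r => max acc (bLastNonempty r)) init = init ∨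
      ∃ r ∈ ns, bLastNonempty r = ns.foldl (fun acc r => max acc (bLastNonempty r)) init := by
  induction ns with
  | nil => intro init; left; rfl
  | cons r rs ih =>
    intro init
    show rs.foldl _ (max init (bLastNonempty r)) = init ∨ _
    rcases ih (max init (bLastNonempty r)) with h | ⟨r', hr', he⟩
    · rcases max_choice init (bLastNonempty r) with hm | hm
      · left
        rw [h, hm]
      · right
        exact ⟨r, List.mem_cons_self, (h.trans hm).symm⟩
    · right
      exact ⟨r', List.mem_cons_of_mem _ hr', he⟩

lemma foldl_max_zero (s : List (List String)) (h : ∀ r ∈ s, bLastNonempty r = 0) :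
    ∀ a : Nat, s.foldl (fun acc r => max acc (bLastNonempty r)) a = a := by
  induction s with
  | nil => intro a; rfl
  | cons r rs ih =>
    intro a
    show rs.foldl _ (max a (bLastNonempty r)) = a
    rw [h r List.mem_cons_self, Nat.max_zero]
    exact ih (fun r hr => h r (List.mem_cons_of_mem _ hr)) a

lemma W_mem (ns : List (List String)) : pvW ns = 0 ∨ ∃ r ∈ ns, bLastNonempty r = pvW ns := by
  unfold pvW
  exact foldl_max_mem_gen ns 0

lemma W_rtrim (ns : List (List String)) : pvW ns = pvW (pvRtrim ns) := by
  obtain ⟨s, hs, hall⟩ := rtrim_decomp ns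
  have hz : ∀ r ∈ s, bLastNonempty r = 0 := by
    intro r hr
    by_contra hne
    have h1 := (ext_pos_iff r).mp hne
    have h2 := hall r hr
    rw [h1] at h2
    simp at h2
  calc pvW ns = pvW (pvRtrim ns ++ s) := by rw [← hs]
    _ = pvW (pvRtrim ns) := by
        unfold pvW
        rw [List.foldl_append]
        exact foldl_max_zero s hz _

lemma bscan_spec (ns : List (List String)) :
    ns.foldl (fun (st : Nat × Nat × Nat) row =>
      (st.1 + 1, if bLastNonempty row ≠ 0 then st.1 + 1 else st.2.1,
        if bLastNonempty row > st.2.2 then bLastNonempty row else st.2.2)) (0, 0, 0)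
    = (ns.length, (pvRtrim ns).length, pvW ns) := by
  induction ns using List.reverseRecOn with
  | nil => rfl
  | append_singleton xs x ih =>
    rw [List.foldl_append, ih]
    simp only [List.foldl_cons, List.foldl_nil]
    rw [rtrim_concat]
    have hW : pvW (xs ++ [x]) = max (pvW xs) (bLastNonempty x) := by
      unfold pvW
      rw [List.foldl_append]
      rfl
    rw [hW]
    cases hq : pvQ x
    · have hx : bLastNonempty x = 0 := by
        by_contra hne
        rw [(ext_pos_iff x).mp hne] at hq
        simp at hq
      simp [hx]
    · have hx : bLastNonempty x ≠ 0 := (ext_pos_iff x).mpr hq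
      have hmax : (if bLastNonempty x > pvW xs then bLastNonempty x else pvW xs)
          = max (pvW xs) (bLastNonempty x) := by
        split_ifs <;> omega
      simp [hx, hmax]

lemma shrink_spec (t : List (List String)) : ∀ k, pvW t ≤ k → aShrink t k = pvW t := by
  intro k
  induction k with
  | zero =>
    intro h
    have : pvW t = 0 := by omega
    simp [aShrink, this]
  | succ k ih =>
    intro h
    by_cases hW : pvW t ≤ k
    · have hall : t.all (fun row => decide (row.length ≤ k) || (row.getD k "" == "")) = true := by
        rw [List.all_eq_true]
        intro row hr
        by_cases hlen : row.length ≤ k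
        · simp [hlen]
        · have hk' : k < row.length := by omega
          have hE : bLastNonempty row ≤ k := le_trans (W_le t row hr) hW
          have hget : row[k] = "" := ext_ge_empty row k hE hk'
          have hgd : row.getD k "" = "" := by
            rw [List.getD_eq_getElem row "" hk', hget]
          simp only [Bool.or_eq_true, decide_eq_true_eq, beq_iff_eq]
          exact Or.inr hgd
      simp only [aShrink, hall, if_true]
      exact ih hW
    · have hWk : pvW t = k + 1 := by omega
      obtain ⟨r, hr, hre⟩ : ∃ r ∈ t, bLastNonempty r = pvW t := by
        rcases W_mem t with h0 | hmem
        · omega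
        · exact hmem
      have hE : bLastNonempty r = k + 1 := by rw [hre, hWk]
      obtain ⟨hlt, hne⟩ := ext_last_get r (by omega)
      simp only [hE, Nat.add_sub_cancel] at hlt hne
      have hlt' : k < r.length := hlt
      have hall : t.all (fun row => decide (row.length ≤ k) || (row.getD k "" == "")) = false := by
        rw [List.all_eq_false]
        refine ⟨r, hr, ?_⟩
        have h1 : ¬ r.length ≤ k := by omega
        have h2 : r.getD k "" ≠ "" := by
          rw [List.getD_eq_getElem r "" hlt']
          simpa using hne
        simp only [Bool.or_eq_true, decide_eq_true_eq, beq_iff_eq, not_or]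
        exact ⟨h1, h2⟩
      simp only [aShrink, hall, Bool.false_eq_true, if_false]
      omega

lemma main_eq (rows : List (List (Option String))) :
    normalize_table_data rows = normalize_table_data_alt rows := by
  unfold normalize_table_data normalize_table_data_alt
  have hcell : aStripCell = bStripCell := by
    funext cell
    cases cell <;> rfl
  dsimp only []
  rw [PySem.List.foldl_append_singleton_eq_map, List.nil_append, hcell]
  rw [aPop_eq_rtrim, bscan_spec]
  set ns := rows.map (fun row => row.map bStripCell) with hns
  by_cases ht : pvRtrim ns = []
  · have hW : pvW ns = 0 := by
      rw [W_rtrim, ht]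
      rfl
    simp [ht, hW]
  · have hWt : pvW (pvRtrim ns) ≠ 0 := by
      obtain ⟨r, hr, hq⟩ := rtrim_last ns ht
      have : bLastNonempty r ≠ 0 := (ext_pos_iff r).mpr hq
      have hle := W_le (pvRtrim ns) r hr
      omega
    have hW : pvW ns ≠ 0 := by rw [W_rtrim]; exact hWt
    -- the A-side max over lengths dominates pvW
    have hMC : pvW (pvRtrim ns) ≤ ((PySem.List.max? ((pvRtrim ns).map (fun row => row.length)) (fun x => x)).getD 0) := by
      obtain ⟨m, hm⟩ : ∃ m, PySem.List.max? ((pvRtrim ns).map (fun row => row.length)) (fun x => x) = some m := by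
        rcases hx : PySem.List.max? ((pvRtrim ns).map (fun row => row.length)) (fun x => x) with _ | m
        · rw [PySem.List.max?_eq_none_iff] at hx
          simp at hx
          exact absurd hx ht
        · exact ⟨m, hx⟩
      rw [hm]
      simp only [Option.getD_some]
      have hmax := PySem.List.max?_isMax hm
      rcases W_mem (pvRtrim ns) with h0 | ⟨r, hr, hre⟩
      · omega
      · have h1 : bLastNonempty r ≤ r.length := ext_le_length r
        have h2 : r.length ≤ m := hmax r.length (List.mem_map_of_mem hr)
        omega
    have hshrink := shrink_spec (pvRtrim ns) _ hMC
    rw [if_neg ht, hshrink]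
    dsimp only
    rw [← W_rtrim, if_neg hW, rtrim_prefix, if_neg hW]

-- ===== VERDICT (by name: the statement is the Claim_ definition above) =====
theorem normalize_table_data_spec : Claim_equal_normalize_table_data := by
  intro rows _
  unfold Spec_normalize_table_data
  exact main_eq rows
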